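-- pv_equiv track=rewrite | github.com/kp-forks/astroquery | astroquery/utils/tap/core.py | get_new_column_values_for_update
-- ===== SOURCE A (Python) =====
-- def get_new_column_values_for_update(list_of_changes, column_name, c_flags, c_indexed, c_ucd, c_utype):
--     found_new_flags = False
--     found_new_indexed = False
--     found_new_ucd = False
--     found_new_utype = False
--     n_flags = None
--     n_indexed = None
--     n_utype = None
--     n_ucd = None
--     for change in list_of_changes:
--         if str(change[0]) == column_name:
--             if str(change[1]) == 'flags':
--                 n_flags = str(change[2])
--                 found_new_flags = True
--             if str(change[1]) == 'indexed':
--                 n_indexed = str(change[2])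
--                 found_new_indexed = True
--             if str(change[1]) == 'ucd':
--                 n_ucd = str(change[2])
--                 found_new_ucd = True
--             if str(change[1]) == 'utype':
--                 n_utype = str(change[2])
--                 found_new_utype = True
--
--     if found_new_ucd:
--         ucd = n_ucd
--     else:
--         ucd = c_ucd
--
--     if found_new_utype:
--         utype = n_utype
--     else:
--         utype = c_utype
--
--     if found_new_indexed:
--         indexed = n_indexed
--     else:
--         indexed = c_indexed
--
--     # index could be updated
--     if found_new_flags:
--         if n_flags is None or n_flags == '':
--             if found_new_indexed:
--                 indexed = str(n_indexed)
--             else: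
--                 indexed = str(False)
--         else:
--             # Index required for PK, Ra, Dec
--             if c_flags == 'Ra' or c_flags == 'Dec' or c_flags == 'PK':
--                 indexed = str(True)
--         flags = n_flags
--     else:
--         flags = c_flags
--
--     return flags, indexed, ucd, utype
-- ===== SOURCE B (Python) =====
-- def get_new_column_values_for_update(list_of_changes, column_name, c_flags, c_indexed, c_ucd, c_utype):
--     # Instead of one forward pass with four found-flags, do four independent
--     # backward first-match searches (the first match in reverse order is the
--     # last-wins value of the forward loop).
--     def last(key):
--         return next((str(ch[2]) for ch in reversed(list_of_changes)
--                      if str(ch[0]) == column_name and str(ch[1]) == key), None)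
--     n_flags = last('flags')
--     n_indexed = last('indexed')
--     ucd = last('ucd')
--     utype = last('utype')
--     if ucd is None:
--         ucd = c_ucd
--     if utype is None:
--         utype = c_utype
--     if n_flags is None:
--         return c_flags, (c_indexed if n_indexed is None else n_indexed), ucd, utype
--     if n_flags == '':
--         indexed = str(False) if n_indexed is None else n_indexed
--     elif c_flags in ('Ra', 'Dec', 'PK'):
--         indexed = str(True)
--     else:
--         indexed = c_indexed if n_indexed is None else n_indexed
--     return n_flags, indexed, ucd, utype
-- ===== Notes on version B (the rewrite author's own statement) =====
-- stated objective: alternative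
-- what changed: A's single forward pass maintaining four found-flag/value variable pairs is replaced by four independent backward first-match searches over reversed(list_of_changes) (first match in reverse = last-wins), whose Optional results feed the trailing flags/indexed conditional directly.
import Mathlib
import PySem

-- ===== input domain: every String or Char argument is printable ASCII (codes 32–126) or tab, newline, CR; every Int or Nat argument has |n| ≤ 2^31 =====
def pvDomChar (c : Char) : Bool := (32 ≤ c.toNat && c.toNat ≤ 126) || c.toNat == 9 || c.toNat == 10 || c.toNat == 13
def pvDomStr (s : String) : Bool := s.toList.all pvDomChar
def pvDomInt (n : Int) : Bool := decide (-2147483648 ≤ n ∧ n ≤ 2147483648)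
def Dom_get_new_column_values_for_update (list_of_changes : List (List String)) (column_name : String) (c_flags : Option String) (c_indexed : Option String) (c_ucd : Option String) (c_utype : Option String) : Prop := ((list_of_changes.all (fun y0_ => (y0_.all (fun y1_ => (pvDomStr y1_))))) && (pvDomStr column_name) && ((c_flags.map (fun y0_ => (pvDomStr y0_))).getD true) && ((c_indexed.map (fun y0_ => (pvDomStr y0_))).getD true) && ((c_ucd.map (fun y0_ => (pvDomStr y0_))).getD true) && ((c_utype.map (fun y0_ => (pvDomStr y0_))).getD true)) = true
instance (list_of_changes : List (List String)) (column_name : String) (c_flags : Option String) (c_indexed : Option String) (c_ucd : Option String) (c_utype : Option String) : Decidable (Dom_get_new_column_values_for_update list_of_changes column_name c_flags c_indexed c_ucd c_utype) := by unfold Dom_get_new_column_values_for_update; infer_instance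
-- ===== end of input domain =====

-- B replaces A's single forward pass with four found-flag/value pairs by four independent
-- backward first-match searches over the reversed change list (objective: alternative).

-- ===== PORT A =====
-- loop body of A: the four independent per-key ifs, written componentwise on the state
-- (fF, fI, fU, fUt, nF, nI, nUt, nU), same values in the same order
def pvAStep (column_name : String)
    (s : Bool × Bool × Bool × Bool × Option String × Option String × Option String × Option String)
    (change : List String) :
    Bool × Bool × Bool × Bool × Option String × Option String × Option String × Option String :=
  let c0 := (PySem.List.pyGet? change 0).getD ""
  let c1 := (PySem.List.pyGet? change 1).getD ""
  let c2 := (PySem.List.pyGet? change 2).getD ""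
  if c0 = column_name then
    ((if c1 = "flags" then true else s.1),
     (if c1 = "indexed" then true else s.2.1),
     (if c1 = "ucd" then true else s.2.2.1),
     (if c1 = "utype" then true else s.2.2.2.1),
     (if c1 = "flags" then some c2 else s.2.2.2.2.1),
     (if c1 = "indexed" then some c2 else s.2.2.2.2.2.1),
     (if c1 = "utype" then some c2 else s.2.2.2.2.2.2.1),
     (if c1 = "ucd" then some c2 else s.2.2.2.2.2.2.2))
  else s

-- A's post-loop combination block
def pvAFinish (c_flags c_indexed c_ucd c_utype : Option String)
    (s : Bool × Bool × Bool × Bool × Option String × Option String × Option String × Option String) :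
    Option String × Option String × Option String × Option String :=
  match s with
  | (fF, fI, fU, fUt, nF, nI, nUt, nU) =>
    let ucd := if fU then nU else c_ucd
    let utype := if fUt then nUt else c_utype
    let indexed := if fI then nI else c_indexed
    if fF then
      let indexed :=
        if nF = none ∨ nF = some "" then
          (if fI then some (nI.getD "") else some "False")   -- str(n_indexed) / str(False)
        else if c_flags = some "Ra" ∨ c_flags = some "Dec" ∨ c_flags = some "PK" then
          some "True"                                         -- str(True)
        else indexed
      (nF, indexed, ucd, utype)
    else (c_flags, indexed, ucd, utype)

def get_new_column_values_for_update (list_of_changes : List (List String)) (column_name : String) (c_flags : Option String) (c_indexed : Option String) (c_ucd : Option String) (c_utype : Option String) : Option String × Option String × Option String × Option String :=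
  pvAFinish c_flags c_indexed c_ucd c_utype
    (list_of_changes.foldl (pvAStep column_name) (false, false, false, false, none, none, none, none))

-- ===== PORT B =====
-- B's `next((str(ch[2]) for ch in reversed(...) if ...), None)`: first match in a list
-- (applied to list_of_changes.reverse), early return
def pvFirstMatch (column_name key : String) : List (List String) → Option String
  | [] => none
  | ch :: t =>
    if (PySem.List.pyGet? ch 0).getD "" = column_name ∧
       (PySem.List.pyGet? ch 1).getD "" = key then
      some ((PySem.List.pyGet? ch 2).getD "")
    else pvFirstMatch column_name key t

def get_new_column_values_for_update_alt (list_of_changes : List (List String)) (column_name : String) (c_flags : Option String) (c_indexed : Option String) (c_ucd : Option String) (c_utype : Option String) : Option String × Option String × Option String × Option String :=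
  let rev := list_of_changes.reverse
  let n_flags := pvFirstMatch column_name "flags" rev
  let n_indexed := pvFirstMatch column_name "indexed" rev
  let ucd0 := pvFirstMatch column_name "ucd" rev
  let utype0 := pvFirstMatch column_name "utype" rev
  let ucd := if ucd0 = none then c_ucd else ucd0
  let utype := if utype0 = none then c_utype else utype0
  match n_flags with
  | none => (c_flags, (if n_indexed = none then c_indexed else n_indexed), ucd, utype)
  | some f =>
    let indexed :=
      if f = "" then (if n_indexed = none then some "False" else n_indexed)
      else if c_flags = some "Ra" ∨ c_flags = some "Dec" ∨ c_flags = some "PK" then some "True"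
      else (if n_indexed = none then c_indexed else n_indexed)
    (some f, indexed, ucd, utype)

-- ===== PRECONDITION & SPEC =====
-- Pre_ excludes exactly the inputs where Python A raises IndexError: an empty change row,
-- a matching row without an attribute name, or a matching row naming one of the four
-- attributes without a value.
def Pre_get_new_column_values_for_update (list_of_changes : List (List String)) (column_name : String) (c_flags : Option String) (c_indexed : Option String) (c_ucd : Option String) (c_utype : Option String) : Prop :=
  ∀ ch ∈ list_of_changes, 1 ≤ ch.length ∧
    (ch.getD 0 "" = column_name → 2 ≤ ch.length ∧
      (ch.getD 1 "" ∈ (["flags", "indexed", "ucd", "utype"] : List String) → 3 ≤ ch.length))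
instance (list_of_changes : List (List String)) (column_name : String) (c_flags : Option String) (c_indexed : Option String) (c_ucd : Option String) (c_utype : Option String) : Decidable (Pre_get_new_column_values_for_update list_of_changes column_name c_flags c_indexed c_ucd c_utype) := by unfold Pre_get_new_column_values_for_update; infer_instance

def pvWitness_get_new_column_values_for_update : List (List String) × String × Option String × Option String × Option String × Option String :=
  ([["col", "ucd", "meta.id"], ["col", "flags", "Ra"]], "col", some "Ra", none, none, none)

def Spec_get_new_column_values_for_update (list_of_changes : List (List String)) (column_name : String) (c_flags : Option String) (c_indexed : Option String) (c_ucd : Option String) (c_utype : Option String) (out : Option String × Option String × Option String × Option String) : Prop := out = get_new_column_values_for_update_alt list_of_changes column_name c_flags c_indexed c_ucd c_utype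
instance (list_of_changes : List (List String)) (column_name : String) (c_flags : Option String) (c_indexed : Option String) (c_ucd : Option String) (c_utype : Option String) (out : Option String × Option String × Option String × Option String) : Decidable (Spec_get_new_column_values_for_update list_of_changes column_name c_flags c_indexed c_ucd c_utype out) := by unfold Spec_get_new_column_values_for_update; infer_instance

-- ===== CLAIM (what is proved, stated in full; the proofs are below) =====
def Claim_equal_get_new_column_values_for_update : Prop := ∀ (list_of_changes : List (List String)) (column_name : String) (c_flags : Option String) (c_indexed : Option String) (c_ucd : Option String) (c_utype : Option String), Dom_get_new_column_values_for_update list_of_changes column_name c_flags c_indexed c_ucd c_utype → Pre_get_new_column_values_for_update list_of_changes column_name c_flags c_indexed c_ucd c_utype → Spec_get_new_column_values_for_update list_of_changes column_name c_flags c_indexed c_ucd c_utype (get_new_column_values_for_update list_of_changes column_name c_flags c_indexed c_ucd c_utype)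

-- ===== LEMMAS AND PROOFS =====

-- A's state written as a function of the four last-wins option values
def pvMkS (oF oI oU oUt : Option String) :
    Bool × Bool × Bool × Bool × Option String × Option String × Option String × Option String :=
  (oF.isSome, oI.isSome, oU.isSome, oUt.isSome, oF, oI, oUt, oU)

-- the contribution of one change to one key
def pvOne (column_name key : String) (ch : List String) : Option String :=
  if (PySem.List.pyGet? ch 0).getD "" = column_name ∧
     (PySem.List.pyGet? ch 1).getD "" = key then
    some ((PySem.List.pyGet? ch 2).getD "")
  else none

theorem pvFirstMatch_append (cn k : String) (a b : List (List String)) :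
    pvFirstMatch cn k (a ++ b) = (pvFirstMatch cn k a).or (pvFirstMatch cn k b) := by
  induction a with
  | nil => simp [pvFirstMatch]
  | cons ch t ih =>
    simp only [List.cons_append, pvFirstMatch]
    split_ifs with h
    · rfl
    · exact ih

theorem pvFirstMatch_single (cn k : String) (ch : List String) :
    pvFirstMatch cn k [ch] = pvOne cn k ch := by
  simp [pvFirstMatch, pvOne]

theorem pvAStep_mkS (cn : String) (oF oI oU oUt : Option String) (ch : List String) :
    pvAStep cn (pvMkS oF oI oU oUt) ch =
      pvMkS ((pvOne cn "flags" ch).or oF) ((pvOne cn "indexed" ch).or oI)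
            ((pvOne cn "ucd" ch).or oU) ((pvOne cn "utype" ch).or oUt) := by
  simp only [pvAStep, pvMkS, pvOne]
  by_cases h0 : (PySem.List.pyGet? ch 0).getD "" = cn
  · simp only [h0, if_true, true_and]
    split_ifs <;> simp_all
  · simp [h0]

theorem pvFoldA (cn : String) (l : List (List String)) :
    ∀ oF oI oU oUt : Option String,
      l.foldl (pvAStep cn) (pvMkS oF oI oU oUt) =
        pvMkS ((pvFirstMatch cn "flags" l.reverse).or oF)
              ((pvFirstMatch cn "indexed" l.reverse).or oI)
              ((pvFirstMatch cn "ucd" l.reverse).or oU)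
              ((pvFirstMatch cn "utype" l.reverse).or oUt) := by
  induction l with
  | nil => intro oF oI oU oUt; simp [pvFirstMatch]
  | cons ch t ih =>
    intro oF oI oU oUt
    rw [List.foldl_cons, pvAStep_mkS, ih]
    simp only [List.reverse_cons, pvFirstMatch_append, pvFirstMatch_single, Option.or_assoc]

theorem pvFinish_eq (c_flags c_indexed c_ucd c_utype : Option String)
    (oF oI oU oUt : Option String) :
    pvAFinish c_flags c_indexed c_ucd c_utype (pvMkS oF oI oU oUt) =
      (let ucd := if oU = none then c_ucd else oU
       let utype := if oUt = none then c_utype else oUt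
       match oF with
       | none => (c_flags, (if oI = none then c_indexed else oI), ucd, utype)
       | some f =>
         let indexed :=
           if f = "" then (if oI = none then some "False" else oI)
           else if c_flags = some "Ra" ∨ c_flags = some "Dec" ∨ c_flags = some "PK" then some "True"
           else (if oI = none then c_indexed else oI)
         (some f, indexed, ucd, utype)) := by
  cases oF <;> cases oI <;> cases oU <;> cases oUt <;>
    simp [pvAFinish, pvMkS]

-- ===== VERDICT (by name: the statement is the Claim_ definition above) =====
theorem get_new_column_values_for_update_spec : Claim_equal_get_new_column_values_for_update := by
  intro l cn c_flags c_indexed c_ucd c_utype _ _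
  unfold Spec_get_new_column_values_for_update get_new_column_values_for_update
    get_new_column_values_for_update_alt
  have h0 : (false, false, false, false, (none : Option String), (none : Option String),
      (none : Option String), (none : Option String)) = pvMkS none none none none := rfl
  rw [h0, pvFoldA]
  simp only [Option.or_none]
  rw [pvFinish_eq]
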